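-- pv_equiv track=rewrite | github.com/Sharks820/veilbreakers-gamedev-toolkit | Tools/mcp-toolkit/blender_addon/handlers/export.py | _detect_texture_type
-- ===== SOURCE A (Python) =====
-- def _detect_texture_type(img_name: str) -> str:
--     """Classify a texture image by naming convention (EXP-011)."""
--     name_lower = img_name.lower()
--     if any(k in name_lower for k in ("_normal", "_nrm", "_nor", "_n.")):
--         return "normal"
--     if any(k in name_lower for k in ("_rough", "_roughness", "_rgh")):
--         return "roughness"
--     if any(k in name_lower for k in ("_metal", "_metallic", "_mtl")):
--         return "metallic"
--     if any(k in name_lower for k in ("_ao", "_ambient", "_occlusion")):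
--         return "ao"
--     if any(k in name_lower for k in ("_emit", "_emission", "_emissive")):
--         return "emission"
--     if any(k in name_lower for k in ("_height", "_disp", "_displacement", "_bump")):
--         return "height"
--     if any(k in name_lower for k in ("_mask", "_msk")):
--         return "mask"
--     return "albedo"
-- ===== SOURCE B (Python) =====
-- _LABELS = ["normal", "roughness", "metallic", "ao", "emission", "height", "mask"]
--
-- _KEYWORD_PRIO = {
--     "_normal": 0, "_nrm": 0, "_nor": 0, "_n.": 0,
--     "_rough": 1, "_roughness": 1, "_rgh": 1,
--     "_metal": 2, "_metallic": 2, "_mtl": 2,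
--     "_ao": 3, "_ambient": 3, "_occlusion": 3,
--     "_emit": 4, "_emission": 4, "_emissive": 4,
--     "_height": 5, "_disp": 5, "_displacement": 5, "_bump": 5,
--     "_mask": 6, "_msk": 6,
-- }
--
--
-- def _detect_texture_type(img_name: str) -> str:
--     """Classify a texture image: minimum priority over ALL matching keywords."""
--     low = img_name.lower()
--     best = None
--     for kw, prio in _KEYWORD_PRIO.items():
--         if kw in low:
--             best = prio if best is None or prio < best else best
--     return "albedo" if best is None else _LABELS[best]
-- ===== Notes on version B (the rewrite author's own statement) =====
-- stated objective: alternative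
-- what changed: Replaced the ordered short-circuiting if-chain of group membership tests by a single pass over a flat keyword->priority map that aggregates the minimum priority among all matching keywords and then indexes a label table (min-aggregation instead of first-match).
import Mathlib
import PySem

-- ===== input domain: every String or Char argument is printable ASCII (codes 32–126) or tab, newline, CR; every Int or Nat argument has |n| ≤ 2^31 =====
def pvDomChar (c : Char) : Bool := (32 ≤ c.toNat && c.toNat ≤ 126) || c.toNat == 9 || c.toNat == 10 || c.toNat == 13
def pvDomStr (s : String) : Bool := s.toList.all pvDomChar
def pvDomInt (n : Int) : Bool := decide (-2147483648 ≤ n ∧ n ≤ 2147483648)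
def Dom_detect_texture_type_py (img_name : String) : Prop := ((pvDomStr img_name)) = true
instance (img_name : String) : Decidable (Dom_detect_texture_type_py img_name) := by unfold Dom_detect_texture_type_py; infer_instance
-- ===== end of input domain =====

-- B replaces A's ordered if-chain by one pass over a flat keyword->priority map taking the minimum priority of all matches (objective: alternative).

-- ===== PORT A =====
def detect_texture_type_py (img_name : String) : String :=
  let name_lower := PySem.Str.lower img_name
  if ["_normal", "_nrm", "_nor", "_n."].any (fun k => PySem.Str.isIn k name_lower) then "normal"
  else if ["_rough", "_roughness", "_rgh"].any (fun k => PySem.Str.isIn k name_lower) then "roughness"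
  else if ["_metal", "_metallic", "_mtl"].any (fun k => PySem.Str.isIn k name_lower) then "metallic"
  else if ["_ao", "_ambient", "_occlusion"].any (fun k => PySem.Str.isIn k name_lower) then "ao"
  else if ["_emit", "_emission", "_emissive"].any (fun k => PySem.Str.isIn k name_lower) then "emission"
  else if ["_height", "_disp", "_displacement", "_bump"].any (fun k => PySem.Str.isIn k name_lower) then "height"
  else if ["_mask", "_msk"].any (fun k => PySem.Str.isIn k name_lower) then "mask"
  else "albedo"

-- ===== PORT B =====
def pvLabels : List String := ["normal", "roughness", "metallic", "ao", "emission", "height", "mask"]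

def pvKeywordPrio : List (String × Nat) :=
  [("_normal", 0), ("_nrm", 0), ("_nor", 0), ("_n.", 0),
   ("_rough", 1), ("_roughness", 1), ("_rgh", 1),
   ("_metal", 2), ("_metallic", 2), ("_mtl", 2),
   ("_ao", 3), ("_ambient", 3), ("_occlusion", 3),
   ("_emit", 4), ("_emission", 4), ("_emissive", 4),
   ("_height", 5), ("_disp", 5), ("_displacement", 5), ("_bump", 5),
   ("_mask", 6), ("_msk", 6)]

-- 'best = prio if best is None or prio < best else best' = keep the minimum priority seen
def pvMinOpt (acc : Option Nat) (p : Nat) : Option Nat :=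
  match acc with
  | none => some p
  | some q => some (min q p)

def detect_texture_type_py_alt (img_name : String) : String :=
  let low := PySem.Str.lower img_name
  let best := pvKeywordPrio.foldl
    (fun acc kp => if PySem.Str.isIn kp.1 low then pvMinOpt acc kp.2 else acc) none
  match best with
  | none => "albedo"
  | some p => pvLabels.getD p "albedo"

-- ===== PRECONDITION & SPEC =====
def Spec_detect_texture_type_py (img_name : String) (out : String) : Prop := out = detect_texture_type_py_alt img_name
instance (img_name : String) (out : String) : Decidable (Spec_detect_texture_type_py img_name out) := by unfold Spec_detect_texture_type_py; infer_instance

-- ===== CLAIM (what is proved, stated in full; the proofs are below) =====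
def Claim_equal_detect_texture_type_py : Prop := ∀ (img_name : String), Dom_detect_texture_type_py img_name → Spec_detect_texture_type_py img_name (detect_texture_type_py img_name)

-- ===== LEMMAS AND PROOFS =====

def pvStep (b : Bool) (p : Nat) (acc : Option Nat) : Option Nat :=
  if b then pvMinOpt acc p else acc

theorem pvMinOpt_idem (acc : Option Nat) (p : Nat) : pvMinOpt (pvMinOpt acc p) p = pvMinOpt acc p := by
  cases acc <;> simp [pvMinOpt]

theorem pv_foldl_group (low : String) (p : Nat) (ks : List String) (acc : Option Nat) :
    List.foldl (fun acc kp => if PySem.Str.isIn kp.1 low then pvMinOpt acc kp.2 else acc) acc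
      (ks.map (fun k => (k, p)))
    = pvStep (ks.any (fun k => PySem.Str.isIn k low)) p acc := by
  induction ks generalizing acc with
  | nil => simp [pvStep]
  | cons k ks ih =>
    simp only [List.map_cons, List.foldl_cons, List.any_cons]
    cases h : PySem.Str.isIn k low with
    | true =>
      rw [if_pos rfl, ih, Bool.true_or]
      cases hb : ks.any (fun k => PySem.Str.isIn k low) <;>
        simp [pvStep, pvMinOpt_idem]
    | false =>
      rw [if_neg (by simp), ih, Bool.false_or]

theorem pv_fold_eq (low : String) :
    pvKeywordPrio.foldl (fun acc kp => if PySem.Str.isIn kp.1 low then pvMinOpt acc kp.2 else acc) none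
    = pvStep (["_mask", "_msk"].any (fun k => PySem.Str.isIn k low)) 6
      (pvStep (["_height", "_disp", "_displacement", "_bump"].any (fun k => PySem.Str.isIn k low)) 5
      (pvStep (["_emit", "_emission", "_emissive"].any (fun k => PySem.Str.isIn k low)) 4
      (pvStep (["_ao", "_ambient", "_occlusion"].any (fun k => PySem.Str.isIn k low)) 3
      (pvStep (["_metal", "_metallic", "_mtl"].any (fun k => PySem.Str.isIn k low)) 2
      (pvStep (["_rough", "_roughness", "_rgh"].any (fun k => PySem.Str.isIn k low)) 1
      (pvStep (["_normal", "_nrm", "_nor", "_n."].any (fun k => PySem.Str.isIn k low)) 0 none)))))) := by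
  have h : pvKeywordPrio =
      (["_normal", "_nrm", "_nor", "_n."].map (fun k => (k, 0)))
      ++ (["_rough", "_roughness", "_rgh"].map (fun k => (k, 1)))
      ++ (["_metal", "_metallic", "_mtl"].map (fun k => (k, 2)))
      ++ (["_ao", "_ambient", "_occlusion"].map (fun k => (k, 3)))
      ++ (["_emit", "_emission", "_emissive"].map (fun k => (k, 4)))
      ++ (["_height", "_disp", "_displacement", "_bump"].map (fun k => (k, 5)))
      ++ (["_mask", "_msk"].map (fun k => (k, 6))) := by rfl
  rw [h]
  simp only [List.foldl_append, pv_foldl_group]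

theorem pv_key (b0 b1 b2 b3 b4 b5 b6 : Bool) :
    (if b0 then "normal"
     else if b1 then "roughness"
     else if b2 then "metallic"
     else if b3 then "ao"
     else if b4 then "emission"
     else if b5 then "height"
     else if b6 then "mask"
     else "albedo")
    = (match pvStep b6 6 (pvStep b5 5 (pvStep b4 4 (pvStep b3 3 (pvStep b2 2 (pvStep b1 1 (pvStep b0 0 none)))))) with
       | none => "albedo"
       | some p => pvLabels.getD p "albedo") := by
  cases b0 <;> cases b1 <;> cases b2 <;> cases b3 <;> cases b4 <;> cases b5 <;> cases b6 <;> decide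

-- ===== VERDICT (by name: the statement is the Claim_ definition above) =====
theorem detect_texture_type_py_spec : Claim_equal_detect_texture_type_py := by
  intro img_name _
  unfold Spec_detect_texture_type_py
  simp only [detect_texture_type_py, detect_texture_type_py_alt]
  rw [pv_fold_eq]
  exact pv_key _ _ _ _ _ _ _
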